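-- pv_equiv track=rewrite | github.com/Jungsu-lilly/coding_test_study | 프로그래머스/lv2/이재관/codingTestStudy_0802.py | solution
-- ===== SOURCE A (Python) =====
-- def solution(w, h):
--     answer = 1
--     total = w * h
--
--     def gcd(a, b):
--         while b > 0:
--             a, b = b, a % b
--         return a
--
--     w1 = int(w / gcd(w, h))
--     h1 = int(h / gcd(w, h))
--     answer = total - (w1 + h1 - 1) * gcd(w, h)
--
--     return answer
-- ===== SOURCE B (Python) =====
-- def solution(w, h):
--     def gcd2(a, b):
--         # binary (Stein) gcd on non-negative integers
--         if a == 0: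
--             return b
--         if b == 0:
--             return a
--         if a % 2 == 0:
--             if b % 2 == 0:
--                 return 2 * gcd2(a // 2, b // 2)
--             return gcd2(a // 2, b)
--         if b % 2 == 0:
--             return gcd2(a, b // 2)
--         if a >= b:
--             return gcd2((a - b) // 2, b)
--         return gcd2((b - a) // 2, a)
--
--     g = gcd2(abs(w), abs(h))
--     # uncrossed squares = interior (w-1)x(h-1) block + (g-1) along the diagonal
--     return (w - 1) * (h - 1) + (g - 1)
-- ===== Notes on version B (the rewrite author's own statement) =====
-- stated objective: alternative
-- what changed: Replaces A's Euclidean modulo loop and float-division closed form total-(w/g+h/g-1)*g with a recursive binary (Stein) gcd of shifts and subtractions and the decomposition (w-1)*(h-1)+(g-1).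
-- outside the precondition, e.g. on solution(5, -3): A returns -15, B returns -16; on solution(0, 0): A raises ZeroDivisionError, B returns 0
import Mathlib
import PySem

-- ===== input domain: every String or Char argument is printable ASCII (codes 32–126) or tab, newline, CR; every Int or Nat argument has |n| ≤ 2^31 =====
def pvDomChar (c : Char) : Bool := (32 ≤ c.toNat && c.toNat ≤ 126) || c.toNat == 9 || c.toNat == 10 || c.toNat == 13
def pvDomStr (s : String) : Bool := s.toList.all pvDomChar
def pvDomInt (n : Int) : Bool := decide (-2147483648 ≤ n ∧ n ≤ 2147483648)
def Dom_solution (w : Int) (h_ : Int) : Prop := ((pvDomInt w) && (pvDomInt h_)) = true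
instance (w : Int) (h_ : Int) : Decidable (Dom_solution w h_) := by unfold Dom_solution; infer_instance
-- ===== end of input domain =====

-- B replaces A's float-division Euclid closed form by a binary (Stein) gcd and the
-- decomposition (w-1)*(h-1) + (g-1) (alternative algorithm, same exact values on h_ ≥ 1).

-- ===== PORT A =====
-- A's inner 'def gcd(a, b): while b > 0: a, b = b, a % b; return a' (Python % = floor mod)
def pygcdA (a b : Int) : Int :=
  if hb : 0 < b then pygcdA b (PySem.Int.mod a b) else a
termination_by b.toNat
decreasing_by
  have h1 : PySem.Int.mod a b = a % b := PySem.Int.mod_eq_emod_of_pos hb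
  have h3 : a % b < b := Int.emod_lt_of_pos a hb
  have h2 : 0 ≤ a % b := Int.emod_nonneg a (ne_of_gt hb)
  omega

def solution (w : Int) (h_ : Int) : Int :=
  -- answer = 1 (dead store); total = w * h
  let total := w * h_
  let g := pygcdA w h_
  -- int(w / gcd(w, h)): float true division then int() = truncation; exact truncated
  -- division on the |args| ≤ 2^31 domain (doubles are exact below 2^53)
  let w1 := Int.tdiv w g
  let h1 := Int.tdiv h_ g
  total - (w1 + h1 - 1) * g

-- ===== PORT B =====
-- B's 'def gcd2(a, b)' is only ever called on non-negative ints (abs), so it is a Nat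
-- helper; Python's //2, -, >= coincide with Nat's /2, -, ≥ on that domain
def gcd2 (a b : Nat) : Nat :=
  if a = 0 then b
  else if b = 0 then a
  else if a % 2 = 0 then
    if b % 2 = 0 then 2 * gcd2 (a / 2) (b / 2)
    else gcd2 (a / 2) b
  else if b % 2 = 0 then gcd2 a (b / 2)
  else if b ≤ a then gcd2 ((a - b) / 2) b
  else gcd2 ((b - a) / 2) a
termination_by a + b
decreasing_by all_goals omega

def solution_alt (w : Int) (h_ : Int) : Int :=
  let g := gcd2 w.natAbs h_.natAbs
  (w - 1) * (h_ - 1) + ((g : Int) - 1)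

-- ===== PRECONDITION & SPEC =====
-- Pre_ excludes h_ ≤ 0, where the rectangle is degenerate: A's returned value there falls
-- accidentally out of the never-entered Euclid loop (gcd = w, answer = w*h - int(h/w)*w),
-- and A raises ZeroDivisionError when additionally w = 0.
def Pre_solution (w : Int) (h_ : Int) : Prop := 1 ≤ h_
instance (w : Int) (h_ : Int) : Decidable (Pre_solution w h_) := by unfold Pre_solution; infer_instance
def pvWitness_solution : Int × Int := (4, 6)

def Spec_solution (w : Int) (h_ : Int) (out : Int) : Prop := out = solution_alt w h_
instance (w : Int) (h_ : Int) (out : Int) : Decidable (Spec_solution w h_ out) := by unfold Spec_solution; infer_instance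

-- ===== CLAIM (what is proved, stated in full; the proofs are below) =====
def Claim_equal_solution : Prop := ∀ (w : Int) (h_ : Int), Dom_solution w h_ → Pre_solution w h_ → Spec_solution w h_ (solution w h_)

-- ===== LEMMAS AND PROOFS =====

-- one Euclid step preserves the gcd
lemma gcd_step (a b : Int) : Int.gcd b (a % b) = Int.gcd a b := by
  apply Nat.dvd_antisymm
  · apply Int.dvd_gcd
    · have h1 : (Int.gcd b (a % b) : Int) ∣ b := Int.gcd_dvd_left b (a % b)
      have h2 : (Int.gcd b (a % b) : Int) ∣ a % b := Int.gcd_dvd_right b (a % b)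
      have h4 : (Int.gcd b (a % b) : Int) ∣ b * (a / b) + a % b := dvd_add (h1.mul_right _) h2
      rwa [Int.mul_ediv_add_emod] at h4
    · exact Int.gcd_dvd_left b (a % b)
  · apply Int.dvd_gcd
    · exact Int.gcd_dvd_right a b
    · have h1 : (Int.gcd a b : Int) ∣ a := Int.gcd_dvd_left a b
      have h2 : (Int.gcd a b : Int) ∣ b := Int.gcd_dvd_right a b
      have h4 : (Int.gcd a b : Int) ∣ a - b * (a / b) := dvd_sub h1 (h2.mul_right _)
      have h5 : a - b * (a / b) = a % b := by have := Int.mul_ediv_add_emod a b; omega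
      rwa [h5] at h4

-- A's gcd loop computes Int.gcd for a positive second argument
lemma pygcdA_eq (n : Nat) : ∀ (a b : Int), 0 < b → b.toNat ≤ n → pygcdA a b = (Int.gcd a b : Int) := by
  induction n with
  | zero => intro a b hb hn; omega
  | succ n ih =>
    intro a b hb hn
    rw [pygcdA, dif_pos hb, PySem.Int.mod_eq_emod_of_pos hb]
    have h2 : 0 ≤ a % b := Int.emod_nonneg a (ne_of_gt hb)
    have h3 : a % b < b := Int.emod_lt_of_pos a hb
    by_cases hr : a % b = 0
    · rw [hr, pygcdA, dif_neg (by omega : ¬ (0:Int) < 0)]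
      rw [← gcd_step a b, hr, Int.gcd_zero_right]
      omega
    · rw [ih b (a % b) (by omega) (by omega), gcd_step a b]

-- B's binary gcd computes Nat.gcd
lemma gcd2_eq (n : Nat) : ∀ a b : Nat, a + b ≤ n → gcd2 a b = Nat.gcd a b := by
  induction n with
  | zero =>
    intro a b hn
    have ha : a = 0 := by omega
    rw [ha, gcd2, if_pos rfl, Nat.gcd_zero_left]
  | succ n ih =>
    intro a b hn
    rw [gcd2]
    by_cases ha : a = 0
    · rw [if_pos ha, ha, Nat.gcd_zero_left]
    rw [if_neg ha]
    by_cases hb : b = 0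
    · rw [if_pos hb, hb, Nat.gcd_zero_right]
    rw [if_neg hb]
    by_cases ha2 : a % 2 = 0
    · rw [if_pos ha2]
      by_cases hb2 : b % 2 = 0
      · rw [if_pos hb2, ih (a / 2) (b / 2) (by omega)]
        have h1 : a = 2 * (a / 2) := by omega
        have h2 : b = 2 * (b / 2) := by omega
        conv_rhs => rw [h1, h2]
        rw [Nat.gcd_mul_left]
      · rw [if_neg hb2, ih (a / 2) b (by omega)]
        have hcop : Nat.Coprime 2 b := (Nat.prime_two.coprime_iff_not_dvd).mpr (by omega)
        have h1 : a = 2 * (a / 2) := by omega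
        conv_rhs => rw [h1]
        rw [hcop.gcd_mul_left_cancel (a / 2)]
    · rw [if_neg ha2]
      by_cases hb2 : b % 2 = 0
      · rw [if_pos hb2, ih a (b / 2) (by omega)]
        have hcop : Nat.Coprime 2 a := (Nat.prime_two.coprime_iff_not_dvd).mpr (by omega)
        have h1 : b = 2 * (b / 2) := by omega
        conv_rhs => rw [h1]
        rw [Nat.gcd_comm a (2 * (b / 2)), hcop.gcd_mul_left_cancel (b / 2), Nat.gcd_comm]
      · rw [if_neg hb2]
        by_cases hle : b ≤ a
        · rw [if_pos hle, ih ((a - b) / 2) b (by omega)]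
          have hcop : Nat.Coprime 2 b := (Nat.prime_two.coprime_iff_not_dvd).mpr (by omega)
          have h1 : a - b = 2 * ((a - b) / 2) := by omega
          rw [← Nat.gcd_sub_self_left hle]
          conv_rhs => rw [h1]
          rw [hcop.gcd_mul_left_cancel ((a - b) / 2)]
        · rw [if_neg hle, ih ((b - a) / 2) a (by omega)]
          have hcop : Nat.Coprime 2 a := (Nat.prime_two.coprime_iff_not_dvd).mpr (by omega)
          have h1 : b - a = 2 * ((b - a) / 2) := by omega
          rw [Nat.gcd_comm a b, ← Nat.gcd_sub_self_left (by omega : a ≤ b)]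
          conv_rhs => rw [h1]
          rw [hcop.gcd_mul_left_cancel ((b - a) / 2)]

-- ===== VERDICT (by name: the statement is the Claim_ definition above) =====
theorem solution_spec : Claim_equal_solution := by
  intro w h_ _ hpre
  unfold Spec_solution solution solution_alt
  have hh : 0 < h_ := hpre
  -- the gcd and its basic facts
  have hgcd : pygcdA w h_ = (Int.gcd w h_ : Int) := pygcdA_eq h_.toNat w h_ hh (le_refl _)
  set G : Int := (Int.gcd w h_ : Int) with hG
  have hGw : G ∣ w := Int.gcd_dvd_left w h_
  have hGh : G ∣ h_ := Int.gcd_dvd_right w h_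
  have hGpos : 0 < G := by
    have : Int.gcd w h_ ≠ 0 := by
      intro hc
      have := Int.eq_zero_of_gcd_eq_zero_right hc
      omega
    omega
  -- A's side: tdiv is exact division here, and the formula collapses to w*h - (w + h - G)
  have htw : Int.tdiv w G = w / G := by
    rw [Int.tdiv_eq_ediv, if_pos (Or.inr hGw)]
    omega
  have hth : Int.tdiv h_ G = h_ / G := by
    rw [Int.tdiv_eq_ediv, if_pos (Or.inr hGh)]
    omega
  have hA : (Int.tdiv w (pygcdA w h_) + Int.tdiv h_ (pygcdA w h_) - 1) * (pygcdA w h_)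
      = w + h_ - G := by
    rw [hgcd, htw, hth, sub_mul, add_mul, Int.ediv_mul_cancel hGw,
      Int.ediv_mul_cancel hGh, one_mul]
  -- B's side: the binary gcd is Int.gcd
  have hB : gcd2 w.natAbs h_.natAbs = Int.gcd w h_ := by
    rw [gcd2_eq (w.natAbs + h_.natAbs) w.natAbs h_.natAbs (le_refl _), Int.gcd_eq_natAbs]
  change w * h_ - (Int.tdiv w (pygcdA w h_) + Int.tdiv h_ (pygcdA w h_) - 1) * (pygcdA w h_)
      = (w - 1) * (h_ - 1) + ((gcd2 w.natAbs h_.natAbs : Int) - 1)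
  rw [hA, hB, ← hG]
  ring
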